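-- pv_equiv track=rewrite | github.com/antonybevan/h-perforatum-network-tox | research/ecnp-generalization/scripts/archive/phases/phase2_dili/stratified_analysis.py | get_mechanism
-- ===== SOURCE A (Python) =====
-- METABOLIC_DILI = {
--     'acetaminophen', 'paracetamol', 'valproic acid', 'valproate', 'amiodarone',
--     'tetracycline', 'isoniazid', 'methotrexate', 'niacin', 'troglitazone',
--     'rifampicin', 'rifampin', 'didanosine', 'stavudine', 'nevirapine', 'piroxicam',
--     'aspirin', 'acetylsalicylic acid'
-- }
--
-- HEPATOCELLULAR_DILI = {
--     'acetaminophen', 'paracetamol', 'isoniazid', 'halothane', 'diclofenac',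
--     'phenytoin', 'troglitazone', 'phenelzine', 'sertraline', 'naproxen',
--     'methyldopa', 'pemoline', 'aspirin'
-- }
--
-- CHOLESTATIC_DILI = {
--     'amoxicillin', 'clavulanic acid', 'chlorpromazine', 'erythromycin',
--     'ciprofloxacin', 'ofloxacin', 'azithromycin', 'phenytoin', 'sulindac',
--     'carbamazepine', 'ketoconazole', 'rifampicin', 'rifampin', 'glimepiride',
--     'flucloxacillin', 'ticlopidine', 'indomethacin', 'fenoprofen'
-- }
--
-- IMMUNE_MEDIATED_DILI = {
--     'halothane', 'diclofenac', 'sulfamethoxazole', 'trimethoprim', 'dapsone',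
--     'chlorpromazine', 'amoxicillin', 'clavulanic acid', 'erythromycin',
--     'isoniazid', 'phenytoin', 'methyldopa', 'nitrofurantoin', 'hydralazine',
--     'minocycline', 'ipilimumab', 'nivolumab', 'pembrolizumab', 'rituximab',
--     'imatinib', 'lapatinib'
-- }
--
-- def get_mechanism(drug_name):
--     """Return primary mechanism(s) for a drug."""
--     name = drug_name.lower().strip()
--
--     mechanisms = []
--     for word in name.split():
--         if word in METABOLIC_DILI:
--             mechanisms.append('metabolic')
--         if word in HEPATOCELLULAR_DILI:
--             mechanisms.append('hepatocellular')
--         if word in CHOLESTATIC_DILI: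
--             mechanisms.append('cholestatic')
--         if word in IMMUNE_MEDIATED_DILI:
--             mechanisms.append('immune')
--
--     # Also check full name
--     if name in METABOLIC_DILI:
--         mechanisms.append('metabolic')
--     if name in HEPATOCELLULAR_DILI:
--         mechanisms.append('hepatocellular')
--     if name in CHOLESTATIC_DILI:
--         mechanisms.append('cholestatic')
--     if name in IMMUNE_MEDIATED_DILI:
--         mechanisms.append('immune')
--
--     return list(set(mechanisms)) if mechanisms else ['unknown']
-- ===== SOURCE B (Python) =====
-- # B replaces the four hash-set membership tests with a single sorted
-- # (token, bitmask) table queried by hand-written binary search; the bitmask is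
-- # decoded bit by bit into category labels (bit 0 = metabolic, 1 = hepatocellular,
-- # 2 = cholestatic, 3 = immune), and the per-word and full-name phases are merged
-- # into one token pass.  The final list(set(...)) funnel is kept so the returned
-- # distinct-label list is identical to A's.
--
-- LABELS = ('metabolic', 'hepatocellular', 'cholestatic', 'immune')
--
-- # sorted by token; bit i of the mask set <=> the token belongs to category LABELS[i]
-- MECH_TABLE = [
--     ('acetaminophen', 3),
--     ('acetylsalicylic acid', 1),
--     ('amiodarone', 1),
--     ('amoxicillin', 12),
--     ('aspirin', 3),
--     ('azithromycin', 4),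
--     ('carbamazepine', 4),
--     ('chlorpromazine', 12),
--     ('ciprofloxacin', 4),
--     ('clavulanic acid', 12),
--     ('dapsone', 8),
--     ('diclofenac', 10),
--     ('didanosine', 1),
--     ('erythromycin', 12),
--     ('fenoprofen', 4),
--     ('flucloxacillin', 4),
--     ('glimepiride', 4),
--     ('halothane', 10),
--     ('hydralazine', 8),
--     ('imatinib', 8),
--     ('indomethacin', 4),
--     ('ipilimumab', 8),
--     ('isoniazid', 11),
--     ('ketoconazole', 4),
--     ('lapatinib', 8),
--     ('methotrexate', 1),
--     ('methyldopa', 10),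
--     ('minocycline', 8),
--     ('naproxen', 2),
--     ('nevirapine', 1),
--     ('niacin', 1),
--     ('nitrofurantoin', 8),
--     ('nivolumab', 8),
--     ('ofloxacin', 4),
--     ('paracetamol', 3),
--     ('pembrolizumab', 8),
--     ('pemoline', 2),
--     ('phenelzine', 2),
--     ('phenytoin', 14),
--     ('piroxicam', 1),
--     ('rifampicin', 5),
--     ('rifampin', 5),
--     ('rituximab', 8),
--     ('sertraline', 2),
--     ('stavudine', 1),
--     ('sulfamethoxazole', 8),
--     ('sulindac', 4),
--     ('tetracycline', 1),
--     ('ticlopidine', 4),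
--     ('trimethoprim', 8),
--     ('troglitazone', 3),
--     ('valproate', 1),
--     ('valproic acid', 1),
-- ]
--
--
-- def _mask_of(tok):
--     """Binary search MECH_TABLE for tok; return its category bitmask (0 if absent)."""
--     lo, hi = 0, len(MECH_TABLE)
--     while lo < hi:
--         mid = (lo + hi) // 2
--         if MECH_TABLE[mid][0] < tok:
--             lo = mid + 1
--         else:
--             hi = mid
--     if lo < len(MECH_TABLE) and MECH_TABLE[lo][0] == tok:
--         return MECH_TABLE[lo][1]
--     return 0
--
--
-- def get_mechanism(drug_name):
--     """Return primary mechanism(s) for a drug."""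
--     name = drug_name.lower().strip()
--     mechanisms = []
--     for tok in name.split() + [name]:
--         m = _mask_of(tok)
--         for i in range(4):
--             if m >> i & 1:
--                 mechanisms.append(LABELS[i])
--     return list(set(mechanisms)) if mechanisms else ['unknown']
-- ===== Notes on version B (the rewrite author's own statement) =====
-- stated objective: alternative
-- what changed: Replaces the four hash-set membership tests (run once per word plus once on the full name) with binary search over a single sorted (token, bitmask) table whose mask bits are decoded into category labels, in one merged pass over words + full name; the list(set(...)) dedup funnel is kept unchanged.
import Mathlib
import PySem

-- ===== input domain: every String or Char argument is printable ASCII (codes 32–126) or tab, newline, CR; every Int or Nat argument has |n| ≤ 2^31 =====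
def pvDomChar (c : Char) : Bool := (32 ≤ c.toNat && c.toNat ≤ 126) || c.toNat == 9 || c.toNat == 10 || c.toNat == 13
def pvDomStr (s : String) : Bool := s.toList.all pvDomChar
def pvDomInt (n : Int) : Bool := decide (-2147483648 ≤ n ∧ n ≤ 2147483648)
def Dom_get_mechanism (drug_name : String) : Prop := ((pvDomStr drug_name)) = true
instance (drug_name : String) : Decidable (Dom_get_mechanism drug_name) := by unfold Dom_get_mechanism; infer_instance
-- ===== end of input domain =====

-- B replaces the four hash-set membership tests with binary search over one
-- sorted (token, bitmask) table, decoding mask bits into category labels in a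
-- single merged pass over words + full name; objective: alternative algorithm.


-- ===== PORT A =====
-- The four DILI category sets (Python set literals; PySem.Set = distinct elements).
def METABOLIC_DILI : PySem.Set String := PySem.Set.ofList ["acetaminophen", "paracetamol", "valproic acid", "valproate", "amiodarone", "tetracycline", "isoniazid", "methotrexate", "niacin", "troglitazone", "rifampicin", "rifampin", "didanosine", "stavudine", "nevirapine", "piroxicam", "aspirin", "acetylsalicylic acid"]

def HEPATOCELLULAR_DILI : PySem.Set String := PySem.Set.ofList ["acetaminophen", "paracetamol", "isoniazid", "halothane", "diclofenac", "phenytoin", "troglitazone", "phenelzine", "sertraline", "naproxen", "methyldopa", "pemoline", "aspirin"]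

def CHOLESTATIC_DILI : PySem.Set String := PySem.Set.ofList ["amoxicillin", "clavulanic acid", "chlorpromazine", "erythromycin", "ciprofloxacin", "ofloxacin", "azithromycin", "phenytoin", "sulindac", "carbamazepine", "ketoconazole", "rifampicin", "rifampin", "glimepiride", "flucloxacillin", "ticlopidine", "indomethacin", "fenoprofen"]

def IMMUNE_MEDIATED_DILI : PySem.Set String := PySem.Set.ofList ["halothane", "diclofenac", "sulfamethoxazole", "trimethoprim", "dapsone", "chlorpromazine", "amoxicillin", "clavulanic acid", "erythromycin", "isoniazid", "phenytoin", "methyldopa", "nitrofurantoin", "hydralazine", "minocycline", "ipilimumab", "nivolumab", "pembrolizumab", "rituximab", "imatinib", "lapatinib"]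

-- list(set(mechanisms)) is ported as PySem.Set.ofList (the distinct labels; Python's
-- hash iteration order over a set is not modelled - this function's outputs are compared as sets).
def get_mechanism (drug_name : String) : List String :=
  let name := PySem.Str.strip (PySem.Str.lower drug_name)
  let mechanisms : List String :=
    (PySem.Str.split₀ name).foldl (fun acc word =>
      let acc := if PySem.Set.contains METABOLIC_DILI word then acc ++ ["metabolic"] else acc
      let acc := if PySem.Set.contains HEPATOCELLULAR_DILI word then acc ++ ["hepatocellular"] else acc
      let acc := if PySem.Set.contains CHOLESTATIC_DILI word then acc ++ ["cholestatic"] else acc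
      if PySem.Set.contains IMMUNE_MEDIATED_DILI word then acc ++ ["immune"] else acc) []
  let mechanisms := if PySem.Set.contains METABOLIC_DILI name then mechanisms ++ ["metabolic"] else mechanisms
  let mechanisms := if PySem.Set.contains HEPATOCELLULAR_DILI name then mechanisms ++ ["hepatocellular"] else mechanisms
  let mechanisms := if PySem.Set.contains CHOLESTATIC_DILI name then mechanisms ++ ["cholestatic"] else mechanisms
  let mechanisms := if PySem.Set.contains IMMUNE_MEDIATED_DILI name then mechanisms ++ ["immune"] else mechanisms
  if mechanisms = [] then ["unknown"] else PySem.Set.ofList mechanisms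

-- ===== PORT B =====
def LABELS : List String := ["metabolic", "hepatocellular", "cholestatic", "immune"]

-- sorted by token; bit i of the mask set <=> the token belongs to category LABELS[i]
def MECH_TABLE : List (String × Nat) := [
    ("acetaminophen", 3), ("acetylsalicylic acid", 1), ("amiodarone", 1),
    ("amoxicillin", 12), ("aspirin", 3), ("azithromycin", 4), ("carbamazepine", 4),
    ("chlorpromazine", 12), ("ciprofloxacin", 4), ("clavulanic acid", 12),
    ("dapsone", 8), ("diclofenac", 10), ("didanosine", 1), ("erythromycin", 12),
    ("fenoprofen", 4), ("flucloxacillin", 4), ("glimepiride", 4), ("halothane", 10),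
    ("hydralazine", 8), ("imatinib", 8), ("indomethacin", 4), ("ipilimumab", 8),
    ("isoniazid", 11), ("ketoconazole", 4), ("lapatinib", 8), ("methotrexate", 1),
    ("methyldopa", 10), ("minocycline", 8), ("naproxen", 2), ("nevirapine", 1),
    ("niacin", 1), ("nitrofurantoin", 8), ("nivolumab", 8), ("ofloxacin", 4),
    ("paracetamol", 3), ("pembrolizumab", 8), ("pemoline", 2), ("phenelzine", 2),
    ("phenytoin", 14), ("piroxicam", 1), ("rifampicin", 5), ("rifampin", 5),
    ("rituximab", 8), ("sertraline", 2), ("stavudine", 1), ("sulfamethoxazole", 8),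
    ("sulindac", 4), ("tetracycline", 1), ("ticlopidine", 4), ("trimethoprim", 8),
    ("troglitazone", 3), ("valproate", 1), ("valproic acid", 1)]

-- Python's str '<' (code-point lexicographic), written out structurally over the
-- character lists so the kernel can evaluate it; exact for all Unicode strings.
def strLtB : List Char → List Char → Bool
  | _, [] => false
  | [], _ :: _ => true
  | a :: as, b :: bs => if a < b then true else if b < a then false else strLtB as bs

-- Source B's while lo < hi binary-search loop (mid is always in range, so getD's
-- default is never used).
-- Structural recursion on fuel = hi - lo, the loop's decreasing measure (each
-- iteration shrinks hi - lo by at least 1, so the fuel never runs out early).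
def maskFindGo (tok : String) : Nat → Nat → Nat → Nat
  | 0, lo, _ => lo
  | fuel + 1, lo, hi =>
    if lo < hi then
      let mid := (lo + hi) / 2
      if strLtB (MECH_TABLE.getD mid ("", 0)).1.toList tok.toList then maskFindGo tok fuel (mid + 1) hi
      else maskFindGo tok fuel lo mid
    else lo

def maskFind (tok : String) (lo hi : Nat) : Nat := maskFindGo tok (hi - lo) lo hi

def mask_of (tok : String) : Nat :=
  let lo := maskFind tok 0 MECH_TABLE.length
  if lo < MECH_TABLE.length && (MECH_TABLE.getD lo ("", 0)).1 == tok then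
    (MECH_TABLE.getD lo ("", 0)).2
  else 0

-- 'm >> i & 1' is 0 or 1; 'if m >> i & 1:' is true exactly when it is 1;
-- i runs over range(4) so LABELS[i] is always in range (getD default unused).
def get_mechanism_alt (drug_name : String) : List String :=
  let name := PySem.Str.strip (PySem.Str.lower drug_name)
  let mechanisms : List String :=
    (PySem.Str.split₀ name ++ [name]).foldl (fun acc tok =>
      let m := mask_of tok
      (PySem.List.pyRange 0 4 1).foldl (fun acc i =>
        if (m >>> i.toNat) &&& 1 = 1 then acc ++ [LABELS.getD i.toNat ""] else acc) acc) []
  if mechanisms = [] then ["unknown"] else PySem.Set.ofList mechanisms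

-- ===== PRECONDITION & SPEC =====
def Spec_get_mechanism (drug_name : String) (out : List String) : Prop := out = get_mechanism_alt drug_name
instance (drug_name : String) (out : List String) : Decidable (Spec_get_mechanism drug_name out) := by unfold Spec_get_mechanism; infer_instance

-- ===== CLAIM (what is proved, stated in full; the proofs are below) =====
def Claim_equal_get_mechanism : Prop := ∀ (drug_name : String), Dom_get_mechanism drug_name → Spec_get_mechanism drug_name (get_mechanism drug_name)

-- ===== LEMMAS AND PROOFS =====

-- The labels A appends for one token, in A's fixed test order.
def labelsOf (w : String) : List String :=
  (if PySem.Set.contains METABOLIC_DILI w then ["metabolic"] else []) ++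
  (if PySem.Set.contains HEPATOCELLULAR_DILI w then ["hepatocellular"] else []) ++
  (if PySem.Set.contains CHOLESTATIC_DILI w then ["cholestatic"] else []) ++
  (if PySem.Set.contains IMMUNE_MEDIATED_DILI w then ["immune"] else [])

-- The labels B's bit decode yields for a mask.
def decodeMask (m : Nat) : List String :=
  (if m &&& 1 = 1 then ["metabolic"] else []) ++
  (if (m >>> 1) &&& 1 = 1 then ["hepatocellular"] else []) ++
  (if (m >>> 2) &&& 1 = 1 then ["cholestatic"] else []) ++
  (if (m >>> 3) &&& 1 = 1 then ["immune"] else [])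

-- All tokens any category set mentions (= MECH_TABLE's keys).
def pvKeys : List String := ["acetaminophen", "acetylsalicylic acid", "amiodarone", "amoxicillin", "aspirin", "azithromycin", "carbamazepine", "chlorpromazine", "ciprofloxacin", "clavulanic acid", "dapsone", "diclofenac", "didanosine", "erythromycin", "fenoprofen", "flucloxacillin", "glimepiride", "halothane", "hydralazine", "imatinib", "indomethacin", "ipilimumab", "isoniazid", "ketoconazole", "lapatinib", "methotrexate", "methyldopa", "minocycline", "naproxen", "nevirapine", "niacin", "nitrofurantoin", "nivolumab", "ofloxacin", "paracetamol", "pembrolizumab", "pemoline", "phenelzine", "phenytoin", "piroxicam", "rifampicin", "rifampin", "rituximab", "sertraline", "stavudine", "sulfamethoxazole", "sulindac", "tetracycline", "ticlopidine", "trimethoprim", "troglitazone", "valproate", "valproic acid"]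

lemma app4 (acc : List String) (w : String) :
    (let a1 := if PySem.Set.contains METABOLIC_DILI w then acc ++ ["metabolic"] else acc
     let a2 := if PySem.Set.contains HEPATOCELLULAR_DILI w then a1 ++ ["hepatocellular"] else a1
     let a3 := if PySem.Set.contains CHOLESTATIC_DILI w then a2 ++ ["cholestatic"] else a2
     if PySem.Set.contains IMMUNE_MEDIATED_DILI w then a3 ++ ["immune"] else a3)
    = acc ++ labelsOf w := by
  simp only [labelsOf]
  split_ifs <;> simp

-- B's inner range(4) fold is acc ++ decodeMask m.
lemma inner_decode (m : Nat) (acc : List String) :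
    (PySem.List.pyRange 0 4 1).foldl (fun acc i =>
        if (m >>> i.toNat) &&& 1 = 1 then acc ++ [LABELS.getD i.toNat ""] else acc) acc
    = acc ++ decodeMask m := by
  have h : PySem.List.pyRange 0 4 1 = [0, 1, 2, 3] := by decide
  rw [h]
  have e0 : Int.toNat 0 = 0 := rfl
  have e1 : Int.toNat 1 = 1 := rfl
  have e2 : Int.toNat 2 = 2 := rfl
  have e3 : Int.toNat 3 = 3 := rfl
  simp only [List.foldl, decodeMask, LABELS, e0, e1, e2, e3, Nat.shiftRight_zero,
    List.getD_cons_zero, List.getD_cons_succ]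
  split_ifs <;> simp

-- Non-members of pvKeys get mask 0.
lemma mask_of_notmem (w : String) (h : w ∉ pvKeys) : mask_of w = 0 := by
  unfold mask_of
  set lo := maskFind w 0 MECH_TABLE.length with hlo
  by_cases hc : lo < MECH_TABLE.length && (MECH_TABLE.getD lo ("", 0)).1 == w
  · exfalso
    simp only [Bool.and_eq_true, decide_eq_true_eq, beq_iff_eq] at hc
    obtain ⟨h1, h2⟩ := hc
    have hmem : (MECH_TABLE.getD lo ("", 0)) ∈ MECH_TABLE := by
      rw [List.getD_eq_getElem?_getD, List.getElem?_eq_getElem h1]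
      exact List.getElem_mem _
    have hk : ∀ p ∈ MECH_TABLE, p.1 ∈ pvKeys := by decide
    exact h (h2 ▸ hk _ hmem)
  · simp only [hc]
    simp

set_option maxRecDepth 16384 in
set_option maxHeartbeats 1600000 in
-- B's per-token labels equal A's per-token labels.
lemma tok_eq (w : String) : decodeMask (mask_of w) = labelsOf w := by
  by_cases h : w ∈ pvKeys
  · fin_cases h <;> decide
  · rw [mask_of_notmem w h]
    have hsub : ∀ (L : List String), (∀ x ∈ L, x ∈ pvKeys) → w ∉ L := by
      intro L hL hw; exact h (hL w hw)
    have h1 := hsub METABOLIC_DILI (by decide)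
    have h2 := hsub HEPATOCELLULAR_DILI (by decide)
    have h3 := hsub CHOLESTATIC_DILI (by decide)
    have h4 := hsub IMMUNE_MEDIATED_DILI (by decide)
    simp [labelsOf, decodeMask, PySem.Set.contains, h1, h2, h3, h4, List.contains_eq_mem]

lemma foldA (l : List String) (init : List String) :
    l.foldl (fun acc word =>
      let acc := if PySem.Set.contains METABOLIC_DILI word then acc ++ ["metabolic"] else acc
      let acc := if PySem.Set.contains HEPATOCELLULAR_DILI word then acc ++ ["hepatocellular"] else acc
      let acc := if PySem.Set.contains CHOLESTATIC_DILI word then acc ++ ["cholestatic"] else acc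
      if PySem.Set.contains IMMUNE_MEDIATED_DILI word then acc ++ ["immune"] else acc) init
    = init ++ l.flatMap labelsOf := by
  simp only [app4]
  simp only [PySem.List.foldl_append_eq_flatMap]

lemma foldB (l : List String) (init : List String) :
    l.foldl (fun acc tok =>
      let m := mask_of tok
      (PySem.List.pyRange 0 4 1).foldl (fun acc i =>
        if (m >>> i.toNat) &&& 1 = 1 then acc ++ [LABELS.getD i.toNat ""] else acc) acc) init
    = init ++ l.flatMap labelsOf := by
  simp only [inner_decode, tok_eq]
  simp only [PySem.List.foldl_append_eq_flatMap]

-- A's mechanisms list (body of get_mechanism after the strip/lower), as a function of name.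
def mechsA (name : String) : List String :=
  let mechanisms : List String :=
    (PySem.Str.split₀ name).foldl (fun acc word =>
      let acc := if PySem.Set.contains METABOLIC_DILI word then acc ++ ["metabolic"] else acc
      let acc := if PySem.Set.contains HEPATOCELLULAR_DILI word then acc ++ ["hepatocellular"] else acc
      let acc := if PySem.Set.contains CHOLESTATIC_DILI word then acc ++ ["cholestatic"] else acc
      if PySem.Set.contains IMMUNE_MEDIATED_DILI word then acc ++ ["immune"] else acc) []
  let mechanisms := if PySem.Set.contains METABOLIC_DILI name then mechanisms ++ ["metabolic"] else mechanisms
  let mechanisms := if PySem.Set.contains HEPATOCELLULAR_DILI name then mechanisms ++ ["hepatocellular"] else mechanisms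
  let mechanisms := if PySem.Set.contains CHOLESTATIC_DILI name then mechanisms ++ ["cholestatic"] else mechanisms
  if PySem.Set.contains IMMUNE_MEDIATED_DILI name then mechanisms ++ ["immune"] else mechanisms

-- B's mechanisms list, as a function of name.
def mechsB (name : String) : List String :=
  (PySem.Str.split₀ name ++ [name]).foldl (fun acc tok =>
    let m := mask_of tok
    (PySem.List.pyRange 0 4 1).foldl (fun acc i =>
      if (m >>> i.toNat) &&& 1 = 1 then acc ++ [LABELS.getD i.toNat ""] else acc) acc) []

set_option maxHeartbeats 1000000 in
lemma mechs_eq (name : String) : mechsA name = mechsB name := by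
  unfold mechsA mechsB
  simp only [foldA, foldB, List.nil_append]
  simp only [app4]
  simp only [List.flatMap_append, List.flatMap_cons, List.flatMap_nil, List.append_nil]

lemma main_eq (drug_name : String) : get_mechanism drug_name = get_mechanism_alt drug_name := by
  show (let name := PySem.Str.strip (PySem.Str.lower drug_name);
        if mechsA name = [] then ["unknown"] else PySem.Set.ofList (mechsA name)) =
       (let name := PySem.Str.strip (PySem.Str.lower drug_name);
        if mechsB name = [] then ["unknown"] else PySem.Set.ofList (mechsB name))
  simp only [mechs_eq]

-- ===== VERDICT (by name: the statement is the Claim_ definition above) =====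
theorem get_mechanism_spec : Claim_equal_get_mechanism := by
  intro drug_name _
  unfold Spec_get_mechanism
  exact main_eq drug_name
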